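-- pv_equiv track=rewrite | github.com/GSA-TTS/violentutf-api | tools/pre_audit/git_history_parser.py | _is_architectural_file
-- ===== SOURCE A (Python) =====
-- def _is_architectural_file(file_path: str) -> bool:
--     """Check if a file path indicates architectural significance."""
--     arch_indicators = [
--         "arch",
--         "architecture",
--         "design",
--         "structure",
--         "core",
--         "base",
--         "foundation",
--         "framework",
--         "boundary",
--         "boundaries",
--         "layer",
--         "layers",
--         "module",
--         "component",
--         "auth",  # Authentication is often architectural
--         "security",  # Security is architectural
--         "middleware",  # Middleware is architectural
--     ]
--
--     path_lower = file_path.lower()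
--     # Check each part of the path separately to avoid partial matches
--     # For example, 'core' should match 'core/base.py' but not 'score.py'
--     path_parts = path_lower.replace("/", " ").replace("\\", " ").replace("_", " ").replace("-", " ").split()
--
--     for part in path_parts:
--         if part in arch_indicators:
--             return True
--
--     # Also check if indicators appear as whole segments in the path
--     for indicator in arch_indicators:
--         # Check if indicator appears as a directory or file name
--         if (
--             f"/{indicator}/" in path_lower
--             or path_lower.startswith(f"{indicator}/")
--             or path_lower.endswith(f"/{indicator}")
--         ):
--             return True
--         # Check with file extensions
--         if path_lower.endswith(f"/{indicator}.py") or path_lower == f"{indicator}.py":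
--             return True
--
--     return False
-- ===== SOURCE B (Python) =====
-- ARCH_INDICATORS = {
--     "arch", "architecture", "design", "structure", "core", "base",
--     "foundation", "framework", "boundary", "boundaries", "layer", "layers",
--     "module", "component", "auth", "security", "middleware",
-- }
--
--
-- def _is_architectural_file(file_path: str) -> bool:
--     """Check if a file path indicates architectural significance."""
--     path_lower = file_path.lower()
--     tokens = path_lower.replace("/", " ").replace("\\", " ").replace("_", " ").replace("-", " ").split()
--     if any(t in ARCH_INDICATORS for t in tokens):
--         return True
--     # The whole-segment checks of the original are already covered by the
--     # token scan above; only the indicator-named .py file case remains.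
--     name = path_lower.split("/")[-1]
--     return name.endswith(".py") and name[:-3] in ARCH_INDICATORS
-- ===== Notes on version B (the rewrite author's own statement) =====
-- stated objective: simpler
-- what changed: The per-indicator second loop of A (five substring checks for each of 17 indicators, each scanning the whole path) is dropped: its whole-segment checks are already subsumed by the token scan, so B only extracts the final path segment once and tests its name against the indicator set with one lookup.
import Mathlib
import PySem

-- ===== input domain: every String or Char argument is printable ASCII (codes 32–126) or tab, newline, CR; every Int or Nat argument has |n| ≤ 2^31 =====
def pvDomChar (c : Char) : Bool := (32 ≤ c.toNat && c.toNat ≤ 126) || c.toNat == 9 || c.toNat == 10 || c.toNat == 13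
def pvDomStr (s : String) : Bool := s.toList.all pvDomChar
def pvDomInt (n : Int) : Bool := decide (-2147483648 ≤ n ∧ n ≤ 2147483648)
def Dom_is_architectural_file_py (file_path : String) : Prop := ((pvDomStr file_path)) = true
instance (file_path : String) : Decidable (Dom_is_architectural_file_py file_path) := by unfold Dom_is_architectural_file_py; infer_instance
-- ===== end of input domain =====

-- B drops A's per-indicator substring loop: its whole-segment checks are subsumed by the
-- token scan, so only the final '/'-segment "<indicator>.py" case is checked (objective: simpler).

-- ===== PORT A =====
def pvArchIndicators : List String :=
  ["arch", "architecture", "design", "structure", "core", "base", "foundation",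
   "framework", "boundary", "boundaries", "layer", "layers", "module",
   "component", "auth", "security", "middleware"]

def is_architectural_file_py (file_path : String) : Bool :=
  let arch_indicators := pvArchIndicators
  let path_lower := PySem.Str.lower file_path
  let path_parts := PySem.Str.split₀
    (PySem.Str.replace (PySem.Str.replace (PySem.Str.replace
      (PySem.Str.replace path_lower "/" " ") "\\" " ") "_" " ") "-" " ")
  if path_parts.any (fun part => arch_indicators.contains part) then true
  else if arch_indicators.any (fun indicator =>
      (PySem.Str.isIn ("/" ++ indicator ++ "/") path_lower ||
       PySem.Str.startswith path_lower (indicator ++ "/") ||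
       PySem.Str.endswith path_lower ("/" ++ indicator)) ||
      (PySem.Str.endswith path_lower ("/" ++ indicator ++ ".py") ||
       path_lower == indicator ++ ".py")) then true
  else false

-- ===== PORT B =====
def pvArchSet : PySem.Set String := PySem.Set.ofList
  ["arch", "architecture", "design", "structure", "core", "base", "foundation",
   "framework", "boundary", "boundaries", "layer", "layers", "module",
   "component", "auth", "security", "middleware"]

def is_architectural_file_py_alt (file_path : String) : Bool :=
  let path_lower := PySem.Str.lower file_path
  let tokens := PySem.Str.split₀
    (PySem.Str.replace (PySem.Str.replace (PySem.Str.replace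
      (PySem.Str.replace path_lower "/" " ") "\\" " ") "_" " ") "-" " ")
  if tokens.any (fun t => PySem.Set.contains pvArchSet t) then true
  else
    -- path_lower.split("/")[-1]: '/' is non-empty so split? is `some`, and Python's split
    -- never yields an empty list, so the [-1] IndexError branch is unreachable (defaults are dead code); exact here
    let name := (PySem.List.pyGet? ((PySem.Str.split? path_lower "/").getD []) (-1)).getD ""
    PySem.Str.endswith name ".py" &&
      PySem.Set.contains pvArchSet (PySem.Str.slice name none (some (-3)))

-- ===== PRECONDITION & SPEC =====
def Spec_is_architectural_file_py (file_path : String) (out : Bool) : Prop := out = is_architectural_file_py_alt file_path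
instance (file_path : String) (out : Bool) : Decidable (Spec_is_architectural_file_py file_path out) := by unfold Spec_is_architectural_file_py; infer_instance

-- ===== CLAIM (what is proved, stated in full; the proofs are below) =====
def Claim_equal_is_architectural_file_py : Prop := ∀ (file_path : String), Dom_is_architectural_file_py file_path → Spec_is_architectural_file_py file_path (is_architectural_file_py file_path)

-- ===== LEMMAS AND PROOFS =====

/-- The four separator characters that A's `replace` chain turns into spaces. -/
def pvSep (c : Char) : Bool := c == '/' || c == '\\' || c == '_' || c == '-'

/-- One pass doing what the chain of four single-character replaces does. -/
def pvToSpace (c : Char) : Char := if pvSep c then ' ' else c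

/-- A "good" token: non-empty, no separator and no whitespace characters. -/
def pvGood (w : List Char) : Bool := !w.isEmpty && w.all (fun c => !pvSep c && !PySem.Chars.isspace c)

lemma pvArch_good : ∀ s ∈ pvArchIndicators, pvGood s.toList = true := by decide

-- ---- single-character replace = map ----
lemma pvReplaceGo (a b : Char) : ∀ (fuel : Nat) (l acc : List Char), l.length ≤ fuel →
    PySem.Chars.replace.go [a] [b] fuel l acc
      = acc.reverse ++ l.map (fun c => if c = a then b else c) := by
  intro fuel
  induction fuel with
  | zero =>
    intro l acc h
    have hl : l = [] := List.eq_nil_of_length_eq_zero (Nat.le_zero.mp h)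
    subst hl; simp [PySem.Chars.replace.go]
  | succ n ih =>
    intro l acc h
    cases l with
    | nil => simp [PySem.Chars.replace.go]
    | cons c t =>
      have ht : t.length ≤ n := by simpa using h
      simp only [PySem.Chars.replace.go, List.isPrefixOf, Bool.and_true]
      by_cases hac : a = c
      · subst hac; simp [ih t _ ht]
      · simp [hac, Ne.symm hac, ih t _ ht]

lemma pvReplaceChar (a b : Char) (cs : List Char) :
    PySem.Chars.replace cs [a] [b] = cs.map (fun c => if c = a then b else c) := by
  simp [PySem.Chars.replace, pvReplaceGo a b cs.length cs [] le_rfl]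

lemma pvChainStr (s : String) :
    (PySem.Str.replace (PySem.Str.replace (PySem.Str.replace
      (PySem.Str.replace s "/" " ") "\\" " ") "_" " ") "-" " ").toList
      = s.toList.map pvToSpace := by
  have h1 : ("/" : String).toList = ['/'] := rfl
  have h2 : ("\\" : String).toList = ['\\'] := rfl
  have h3 : ("_" : String).toList = ['_'] := rfl
  have h4 : ("-" : String).toList = ['-'] := rfl
  have h5 : (" " : String).toList = [' '] := rfl
  simp only [PySem.Str.toList_replace, h1, h2, h3, h4, h5, pvReplaceChar, List.map_map]
  refine List.map_congr_left (fun c _ => ?_)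
  simp only [Function.comp, pvToSpace, pvSep]
  by_cases h1 : c = '/' <;> by_cases h2 : c = '\\' <;> by_cases h3 : c = '_' <;>
    by_cases h4 : c = '-' <;> simp [h1, h2, h3, h4]

-- ---- split₀ machinery ----
lemma pvGoAcc : ∀ (s cur : List Char) (acc2 : List (List Char)),
    PySem.Chars.split₀.go s cur acc2 = acc2.reverse ++ PySem.Chars.split₀.go s cur [] := by
  intro s
  induction s with
  | nil =>
    intro cur acc
    simp only [PySem.Chars.split₀.go]
    split <;> simp
  | cons c rest ih =>
    intro cur acc
    simp only [PySem.Chars.split₀.go]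
    split
    · split
      · exact ih [] acc
      · rw [ih [] (cur.reverse :: acc), ih [] [cur.reverse]]; simp
    · exact ih (c :: cur) acc

lemma pvGoCat (s : List Char) : ∀ (l cur : List Char) (acc : List (List Char)),
    PySem.Chars.split₀.go (l ++ ' ' :: s) cur acc
      = PySem.Chars.split₀.go l cur acc ++ PySem.Chars.split₀ s := by
  intro l
  induction l with
  | nil =>
    intro cur acc
    have hsp : PySem.Chars.isspace ' ' = true := rfl
    simp only [List.nil_append, PySem.Chars.split₀.go, hsp, if_true]
    split
    · rw [pvGoAcc s [] acc]; rfl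
    · rw [pvGoAcc s [] (cur.reverse :: acc)]; simp [PySem.Chars.split₀]
  | cons c l' ih =>
    intro cur acc
    simp only [List.cons_append, PySem.Chars.split₀.go]
    split
    · split
      · exact ih [] acc
      · exact ih [] (cur.reverse :: acc)
    · exact ih (c :: cur) acc

lemma pvGoRun : ∀ (w : List Char), (∀ c ∈ w, PySem.Chars.isspace c = false) →
    ∀ (rest cur : List Char) (acc : List (List Char)),
    PySem.Chars.split₀.go (w ++ rest) cur acc = PySem.Chars.split₀.go rest (w.reverse ++ cur) acc := by
  intro w
  induction w with
  | nil => intro _ rest cur acc; simp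
  | cons c w' ih =>
    intro h rest cur acc
    have hc : PySem.Chars.isspace c = false := h c (List.mem_cons_self ..)
    have hw' : ∀ x ∈ w', PySem.Chars.isspace x = false := fun x hx => h x (List.mem_cons_of_mem _ hx)
    simp only [List.cons_append, PySem.Chars.split₀.go, hc, Bool.false_eq_true, if_false]
    rw [ih hw' rest (c :: cur) acc]
    simp

lemma pvSplit₀Single (w : List Char) (hne : w ≠ []) (hns : ∀ c ∈ w, PySem.Chars.isspace c = false) :
    PySem.Chars.split₀ w = [w] := by
  have := pvGoRun w hns [] [] []
  simp only [List.append_nil] at this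
  rw [PySem.Chars.split₀, this, PySem.Chars.split₀.go]
  simp [hne]

lemma pvSplit₀Head (w s : List Char) (hne : w ≠ []) (hns : ∀ c ∈ w, PySem.Chars.isspace c = false) :
    PySem.Chars.split₀ (w ++ ' ' :: s) = w :: PySem.Chars.split₀ s := by
  have hsp : PySem.Chars.isspace ' ' = true := rfl
  rw [PySem.Chars.split₀, pvGoRun w hns (' ' :: s) [] []]
  simp only [PySem.Chars.split₀.go, hsp, if_true, List.append_nil]
  have hne' : w.reverse.isEmpty = false := by simp [hne]
  rw [if_neg (by simp [hne']), pvGoAcc s [] [w.reverse.reverse]]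
  simp [PySem.Chars.split₀]

lemma pvMemMid (w l s : List Char) (hne : w ≠ []) (hns : ∀ c ∈ w, PySem.Chars.isspace c = false) :
    w ∈ PySem.Chars.split₀ (l ++ ' ' :: (w ++ ' ' :: s)) := by
  rw [PySem.Chars.split₀, pvGoCat (w ++ ' ' :: s) l [] [], pvSplit₀Head w s hne hns]
  exact List.mem_append_right _ (List.mem_cons_self ..)

lemma pvMemPre (w s : List Char) (hne : w ≠ []) (hns : ∀ c ∈ w, PySem.Chars.isspace c = false) :
    w ∈ PySem.Chars.split₀ (w ++ ' ' :: s) := by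
  rw [pvSplit₀Head w s hne hns]
  exact List.mem_cons_self ..

lemma pvMemSuf (w l : List Char) (hne : w ≠ []) (hns : ∀ c ∈ w, PySem.Chars.isspace c = false) :
    w ∈ PySem.Chars.split₀ (l ++ ' ' :: w) := by
  rw [PySem.Chars.split₀, pvGoCat w l [] [], pvSplit₀Single w hne hns]
  exact List.mem_append_right _ (List.mem_cons_self ..)

-- ---- splitOn '/' machinery ----
/-- Plain structural split on '/' (keeps empty pieces, like Python's split('/')). -/
def pvSplitSlash : List Char → List (List Char)
  | [] => [[]]
  | c :: t => if c = '/' then [] :: pvSplitSlash t else (pvSplitSlash t).modifyHead (c :: ·)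

lemma pvSplitSlash_ne_nil (l : List Char) : pvSplitSlash l ≠ [] := by
  induction l with
  | nil => simp [pvSplitSlash]
  | cons c t ih =>
    simp only [pvSplitSlash]
    split
    · simp
    · cases h : pvSplitSlash t with
      | nil => exact absurd h ih
      | cons x xs => simp [List.modifyHead]

lemma pvSplitOnGo : ∀ (fuel : Nat) (l cur : List Char) (acc : List (List Char)), l.length ≤ fuel →
    PySem.Chars.splitOn.go ['/'] fuel l cur acc
      = acc.reverse ++ (pvSplitSlash l).modifyHead (cur.reverse ++ ·) := by
  intro fuel
  induction fuel with
  | zero =>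
    intro l cur acc h
    have hl : l = [] := List.eq_nil_of_length_eq_zero (Nat.le_zero.mp h)
    subst hl
    simp [PySem.Chars.splitOn.go, pvSplitSlash, List.modifyHead]
  | succ n ih =>
    intro l cur acc h
    cases l with
    | nil => simp [PySem.Chars.splitOn.go, pvSplitSlash, List.modifyHead]
    | cons c t =>
      have ht : t.length ≤ n := by simpa using h
      simp only [PySem.Chars.splitOn.go, List.isPrefixOf, Bool.and_true, pvSplitSlash]
      by_cases hc : '/' = c
      · subst hc
        have hd : List.drop ['/'].length ('/' :: t) = t := rfl
        simp only [beq_self_eq_true, if_true, hd]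
        rw [ih t [] (cur.reverse :: acc) ht]
        cases hX : pvSplitSlash t with
        | nil => exact absurd hX (pvSplitSlash_ne_nil t)
        | cons x xs => simp [List.modifyHead]
      · have hc' : c ≠ '/' := fun e => hc e.symm
        simp only [beq_iff_eq, if_neg hc, if_neg hc']
        rw [ih t (c :: cur) acc ht]
        cases hX : pvSplitSlash t with
        | nil => exact absurd hX (pvSplitSlash_ne_nil t)
        | cons x xs => simp [List.modifyHead]

lemma pvSplitOnEq (l : List Char) : PySem.Chars.splitOn l ['/'] = pvSplitSlash l := by
  rw [PySem.Chars.splitOn, pvSplitOnGo (l.length + 1) l [] [] (by omega)]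
  cases hX : pvSplitSlash l with
  | nil => exact absurd hX (pvSplitSlash_ne_nil l)
  | cons x xs => simp [List.modifyHead]

lemma pvLastNoSlash (l : List Char) (h : '/' ∉ l) : pvSplitSlash l = [l] := by
  induction l with
  | nil => rfl
  | cons c t ih =>
    have hc : c ≠ '/' := fun e => h (e ▸ List.mem_cons_self ..)
    have ht : '/' ∉ t := fun m => h (List.mem_cons_of_mem _ m)
    simp only [pvSplitSlash, if_neg hc, ih ht, List.modifyHead]

lemma pvSplitSlash_two (r : List Char) : ∀ (l : List Char),
    2 ≤ (pvSplitSlash (l ++ '/' :: r)).length := by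
  intro l
  induction l with
  | nil =>
    have h1 : 0 < (pvSplitSlash r).length := List.length_pos_iff.mpr (pvSplitSlash_ne_nil r)
    have e : pvSplitSlash ('/' :: r) = [] :: pvSplitSlash r := by simp [pvSplitSlash]
    simp only [List.nil_append, e, List.length_cons]
    omega
  | cons c t ih =>
    simp only [List.cons_append, pvSplitSlash]
    split
    · simpa using Nat.le_succ_of_le ih
    · simpa [List.length_modifyHead] using ih

lemma pvLastSeg (r : List Char) (h : '/' ∉ r) : ∀ (l : List Char),
    (pvSplitSlash (l ++ '/' :: r)).getLastD [] = r := by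
  intro l
  induction l with
  | nil =>
    have e : pvSplitSlash ('/' :: r) = [] :: pvSplitSlash r := by simp [pvSplitSlash]
    simp [e, pvLastNoSlash r h]
  | cons c t ih =>
    have h2 := pvSplitSlash_two r t
    have e : pvSplitSlash ((c :: t) ++ '/' :: r)
        = if c = '/' then [] :: pvSplitSlash (t ++ '/' :: r)
          else (pvSplitSlash (t ++ '/' :: r)).modifyHead (c :: ·) := by
      simp [pvSplitSlash]
    rw [e]
    cases hX : pvSplitSlash (t ++ '/' :: r) with
    | nil => exact absurd hX (pvSplitSlash_ne_nil _)
    | cons x xs =>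
      rw [hX] at ih h2
      cases xs with
      | nil => simp at h2
      | cons y ys =>
        by_cases hc : c = '/'
        · simpa [hc, List.getLastD_cons] using ih
        · simpa [hc, List.modifyHead, List.getLastD_cons] using ih

/-- Every list either has no slash or decomposes around its last slash. -/
lemma pvDecomp (p : List Char) : '/' ∉ p ∨ ∃ l r, p = l ++ '/' :: r ∧ '/' ∉ r := by
  induction p with
  | nil => exact Or.inl (by simp)
  | cons c t ih =>
    rcases ih with h | ⟨l, r, rfl, hr⟩
    · by_cases hc : c = '/'
      · exact Or.inr ⟨[], t, by simp [hc], h⟩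
      · refine Or.inl fun m => ?_
        rcases List.mem_cons.mp m with e | e
        exacts [hc e.symm, h e]
    · exact Or.inr ⟨c :: l, r, rfl, hr⟩

-- ---- suffix uniqueness for the ".py" case ----
lemma pvUniqSuffix (l r w : List Char) (hr : '/' ∉ r) (hw : '/' ∉ w)
    (h : '/' :: w <:+ l ++ '/' :: r) : w = r := by
  have h2 : '/' :: r <:+ l ++ '/' :: r := List.suffix_append l ('/' :: r)
  rcases List.suffix_or_suffix_of_suffix h h2 with hs | hs
  · rcases List.suffix_cons_iff.mp hs with he | hs'
    · exact (List.cons.injEq .. ▸ he).2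
    · exact absurd (hs'.subset (List.mem_cons_self ..)) hr
  · rcases List.suffix_cons_iff.mp hs with he | hs'
    · exact ((List.cons.injEq .. ▸ he).2).symm
    · exact absurd (hs'.subset (List.mem_cons_self ..)) hw

lemma pvSliceNeg3 (u v : List Char) (hv : v.length = 3) :
    PySem.List.slice (u ++ v) none (some (-3)) = u := by
  simp only [PySem.List.slice, PySem.List.clampIdx, List.length_append, hv]
  norm_num

-- ---- small bridges ----
lemma pvContainsIff (x : String) :
    PySem.Set.contains pvArchSet x = true ↔ x ∈ pvArchIndicators := by
  rw [show pvArchSet = PySem.Set.ofList pvArchIndicators from rfl,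
    PySem.Set.contains_iff, PySem.Set.mem_ofList]

lemma pvContainsEq (t : String) :
    pvArchIndicators.contains t = PySem.Set.contains pvArchSet t := by
  by_cases h : t ∈ pvArchIndicators
  · rw [List.contains_iff_mem.mpr h, ((pvContainsIff t).mpr h)]
  · rw [Bool.eq_iff_iff]
    simp only [List.contains_iff_mem, pvContainsIff]

lemma pvGoodNe (w : List Char) (h : pvGood w = true) : w ≠ [] := by
  rcases Bool.and_eq_true .. |>.mp h with ⟨h1, _⟩
  simpa using h1

lemma pvGoodNs (w : List Char) (h : pvGood w = true) :
    ∀ c ∈ w, PySem.Chars.isspace c = false := by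
  rcases Bool.and_eq_true .. |>.mp h with ⟨_, h2⟩
  intro c hc
  have := List.all_eq_true.mp h2 c hc
  rcases Bool.and_eq_true .. |>.mp this with ⟨_, h4⟩
  simpa using h4

lemma pvGoodMap (w : List Char) (h : pvGood w = true) : w.map pvToSpace = w := by
  rcases Bool.and_eq_true .. |>.mp h with ⟨_, h2⟩
  have : ∀ c ∈ w, pvToSpace c = c := by
    intro c hc
    have := List.all_eq_true.mp h2 c hc
    rcases Bool.and_eq_true .. |>.mp this with ⟨h3, _⟩
    simp only [Bool.not_eq_true'] at h3
    simp [pvToSpace, h3]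
  simp [List.map_congr_left this]

lemma pvGoodNoSlash (w : List Char) (h : pvGood w = true) : '/' ∉ w := by
  rcases Bool.and_eq_true .. |>.mp h with ⟨_, h2⟩
  intro hm
  have := List.all_eq_true.mp h2 '/' hm
  rcases Bool.and_eq_true .. |>.mp this with ⟨h3, _⟩
  simp [pvSep] at h3

lemma pvPyGetNeg1 {α : Type} (xs : List α) (h : xs ≠ []) (d : α) :
    (PySem.List.pyGet? xs (-1)).getD d = xs.getLastD d := by
  have hl : 0 < xs.length := List.length_pos_iff.mpr h
  simp only [PySem.List.pyGet?, PySem.List.pyIdx?]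
  rw [if_neg (by omega), if_pos (by omega)]
  rw [List.getLastD_eq_getLast?, List.getLast?_eq_getElem?]
  norm_num

lemma pvMapGetLastD {α β : Type} (f : α → β) (X : List α) (h : X ≠ []) (d : α) (d' : β) :
    (X.map f).getLastD d' = f (X.getLastD d) := by
  induction X generalizing d d' with
  | nil => exact absurd rfl h
  | cons x xs ih =>
    cases xs with
    | nil => simp
    | cons y ys =>
      simp only [List.map_cons, List.getLastD_cons]
      have := ih (by simp) y (f y)
      simp only [List.map_cons] at this
      rw [List.getLastD_cons, List.getLastD_cons] at this
      exact this

-- conditions of A's second loop force a token hit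
lemma pvSeg1 (pl w : List Char) (hg : pvGood w = true)
    (h : ('/' :: (w ++ ['/'])) <:+: pl) : w ∈ PySem.Chars.split₀ (pl.map pvToSpace) := by
  obtain ⟨su, t, hst⟩ := h
  subst hst
  have : (su ++ '/' :: (w ++ ['/']) ++ t).map pvToSpace
      = su.map pvToSpace ++ ' ' :: (w ++ ' ' :: t.map pvToSpace) := by
    simp [List.map_append, pvGoodMap w hg, pvToSpace, pvSep]
  rw [this]
  exact pvMemMid w _ _ (pvGoodNe w hg) (pvGoodNs w hg)

lemma pvSeg2 (pl w : List Char) (hg : pvGood w = true)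
    (h : (w ++ ['/']) <+: pl) : w ∈ PySem.Chars.split₀ (pl.map pvToSpace) := by
  obtain ⟨t, hst⟩ := h
  subst hst
  have : ((w ++ ['/']) ++ t).map pvToSpace = w ++ ' ' :: t.map pvToSpace := by
    simp [List.map_append, pvGoodMap w hg, pvToSpace, pvSep]
  rw [this]
  exact pvMemPre w _ (pvGoodNe w hg) (pvGoodNs w hg)

lemma pvSeg3 (pl w : List Char) (hg : pvGood w = true)
    (h : ('/' :: w) <:+ pl) : w ∈ PySem.Chars.split₀ (pl.map pvToSpace) := by
  obtain ⟨su, hst⟩ := h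
  subst hst
  have : (su ++ '/' :: w).map pvToSpace = su.map pvToSpace ++ ' ' :: w := by
    simp [List.map_append, pvGoodMap w hg, pvToSpace, pvSep]
  rw [this]
  exact pvMemSuf w _ (pvGoodNe w hg) (pvGoodNs w hg)

/-- A membership in the token list contradicts `htok`. -/
lemma pvTokHit (P : String)
    (htok : (PySem.Str.split₀ (PySem.Str.replace (PySem.Str.replace (PySem.Str.replace
      (PySem.Str.replace P "/" " ") "\\" " ") "_" " ") "-" " ")).any
        (fun t => PySem.Set.contains pvArchSet t) = false)
    (ind : String) (hin : ind ∈ pvArchIndicators)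
    (hmem : ind.toList ∈ PySem.Chars.split₀ (P.toList.map pvToSpace)) : False := by
  have hmem' : ind ∈ PySem.Str.split₀ (PySem.Str.replace (PySem.Str.replace (PySem.Str.replace
      (PySem.Str.replace P "/" " ") "\\" " ") "_" " ") "-" " ") := by
    rw [PySem.Str.split₀]
    have := pvChainStr P
    rw [this]
    exact List.mem_map.mpr ⟨ind.toList, hmem, String.ofList_toList⟩
  have := List.any_eq_false.mp htok ind hmem'
  rw [(pvContainsIff ind).mpr hin] at this
  simp at this

/-- Characterisation of B's final check. -/
lemma pvBside (nl : List Char) :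
    (PySem.Str.endswith (String.ofList nl) ".py" &&
      PySem.Set.contains pvArchSet (PySem.Str.slice (String.ofList nl) none (some (-3)))) = true
    ↔ ∃ ind ∈ pvArchIndicators, nl = ind.toList ++ ['.', 'p', 'y'] := by
  rw [Bool.and_eq_true]
  constructor
  · rintro ⟨he, hc⟩
    have he' : ['.', 'p', 'y'] <:+ nl := by
      have h1 : PySem.Chars.endswith nl ['.', 'p', 'y'] = true := by
        have h2 : (".py" : String).toList = ['.', 'p', 'y'] := rfl
        simpa [PySem.Str.endswith, h2, String.toList_ofList] using he
      exact (PySem.Chars.endswith_iff ..).mp h1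
    obtain ⟨u, hu⟩ := he'
    have hst : (PySem.Str.slice (String.ofList nl) none (some (-3))).toList = u := by
      rw [PySem.Str.toList_slice, String.toList_ofList, PySem.Chars.slice_eq_listSlice, ← hu]
      exact pvSliceNeg3 u ['.', 'p', 'y'] rfl
    refine ⟨PySem.Str.slice (String.ofList nl) none (some (-3)), (pvContainsIff _).mp hc, ?_⟩
    rw [hst, ← hu]
  · rintro ⟨ind, hin, hnl⟩
    subst hnl
    constructor
    · have h2 : (".py" : String).toList = ['.', 'p', 'y'] := rfl
      rw [PySem.Str.endswith, String.toList_ofList, h2]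
      exact (PySem.Chars.endswith_iff ..).mpr ⟨ind.toList, rfl⟩
    · have hst : (PySem.Str.slice (String.ofList (ind.toList ++ ['.', 'p', 'y'])) none (some (-3))).toList
          = ind.toList := by
        rw [PySem.Str.toList_slice, String.toList_ofList, PySem.Chars.slice_eq_listSlice]
        exact pvSliceNeg3 ind.toList ['.', 'p', 'y'] rfl
      have hx : PySem.Str.slice (String.ofList (ind.toList ++ ['.', 'p', 'y'])) none (some (-3)) = ind := by
        rw [← String.ofList_toList (s := PySem.Str.slice (String.ofList (ind.toList ++ ['.', 'p', 'y'])) none (some (-3))), hst, String.ofList_toList]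
      rw [hx]
      exact (pvContainsIff ind).mpr hin

-- ---- the main equivalence ----
lemma pvMain (fp : String) : is_architectural_file_py fp = is_architectural_file_py_alt fp := by
  unfold is_architectural_file_py is_architectural_file_py_alt
  simp only [pvContainsEq]
  cases htok : (PySem.Str.split₀ (PySem.Str.replace (PySem.Str.replace (PySem.Str.replace
      (PySem.Str.replace (PySem.Str.lower fp) "/" " ") "\\" " ") "_" " ") "-" " ")).any
        (fun t => PySem.Set.contains pvArchSet t) with
  | true => simp
  | false =>
    simp only [Bool.false_eq_true, if_false]
    have hXne := pvSplitSlash_ne_nil (PySem.Str.lower fp).toList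
    have hsplit : (PySem.Str.split? (PySem.Str.lower fp) "/").getD []
        = (pvSplitSlash (PySem.Str.lower fp).toList).map String.ofList := by
      have h1 : ("/" : String).toList = ['/'] := rfl
      simp [PySem.Str.split?, PySem.Chars.split?, h1, pvSplitOnEq]
    have hname : (PySem.List.pyGet? ((PySem.Str.split? (PySem.Str.lower fp) "/").getD []) (-1)).getD ""
        = String.ofList ((pvSplitSlash (PySem.Str.lower fp).toList).getLastD []) := by
      rw [hsplit, pvPyGetNeg1 _ (by simpa using hXne) "",
        pvMapGetLastD String.ofList _ hXne []]
    rw [hname]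
    -- the remaining goal: A's indicator loop = B's final-segment check
    have hiff : (pvArchIndicators.any (fun indicator =>
        (PySem.Str.isIn ("/" ++ indicator ++ "/") (PySem.Str.lower fp) ||
         PySem.Str.startswith (PySem.Str.lower fp) (indicator ++ "/") ||
         PySem.Str.endswith (PySem.Str.lower fp) ("/" ++ indicator)) ||
        (PySem.Str.endswith (PySem.Str.lower fp) ("/" ++ indicator ++ ".py") ||
         PySem.Str.lower fp == indicator ++ ".py"))) = true
        ↔ (PySem.Str.endswith (String.ofList ((pvSplitSlash (PySem.Str.lower fp).toList).getLastD [])) ".py" &&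
           PySem.Set.contains pvArchSet (PySem.Str.slice
             (String.ofList ((pvSplitSlash (PySem.Str.lower fp).toList).getLastD [])) none (some (-3)))) = true := by
      rw [List.any_eq_true, pvBside]
      have key : ∀ ind ∈ pvArchIndicators,
          (((PySem.Str.isIn ("/" ++ ind ++ "/") (PySem.Str.lower fp) ||
             PySem.Str.startswith (PySem.Str.lower fp) (ind ++ "/") ||
             PySem.Str.endswith (PySem.Str.lower fp) ("/" ++ ind)) ||
            (PySem.Str.endswith (PySem.Str.lower fp) ("/" ++ ind ++ ".py") ||
             PySem.Str.lower fp == ind ++ ".py")) = true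
          ↔ (pvSplitSlash (PySem.Str.lower fp).toList).getLastD [] = ind.toList ++ ['.', 'p', 'y']) := by
        intro ind hin
        have hg : pvGood ind.toList = true := pvArch_good ind hin
        have hw' : '/' ∉ ind.toList ++ ['.', 'p', 'y'] := by
          intro hm
          rcases List.mem_append.mp hm with hm | hm
          · exact pvGoodNoSlash ind.toList hg hm
          · simp at hm
        have c1 : PySem.Str.isIn ("/" ++ ind ++ "/") (PySem.Str.lower fp) = true
            ↔ ('/' :: (ind.toList ++ ['/'])) <:+: (PySem.Str.lower fp).toList := by
          rw [PySem.Str.isIn_iff_infix]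
          have : ("/" ++ ind ++ "/").toList = '/' :: (ind.toList ++ ['/']) := by
            simp [String.toList_append]
          rw [this]
        have c2 : PySem.Str.startswith (PySem.Str.lower fp) (ind ++ "/") = true
            ↔ (ind.toList ++ ['/']) <+: (PySem.Str.lower fp).toList := by
          rw [PySem.Str.startswith]
          have : (ind ++ "/").toList = ind.toList ++ ['/'] := by simp [String.toList_append]
          rw [this, PySem.Chars.startswith_iff]
        have c3 : PySem.Str.endswith (PySem.Str.lower fp) ("/" ++ ind) = true
            ↔ ('/' :: ind.toList) <:+ (PySem.Str.lower fp).toList := by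
          rw [PySem.Str.endswith]
          have : ("/" ++ ind).toList = '/' :: ind.toList := by simp [String.toList_append]
          rw [this, PySem.Chars.endswith_iff]
        have c4 : PySem.Str.endswith (PySem.Str.lower fp) ("/" ++ ind ++ ".py") = true
            ↔ ('/' :: (ind.toList ++ ['.', 'p', 'y'])) <:+ (PySem.Str.lower fp).toList := by
          rw [PySem.Str.endswith]
          have : ("/" ++ ind ++ ".py").toList = '/' :: (ind.toList ++ ['.', 'p', 'y']) := by
            simp [String.toList_append]
          rw [this, PySem.Chars.endswith_iff]
        have c5 : (PySem.Str.lower fp == ind ++ ".py") = true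
            ↔ (PySem.Str.lower fp).toList = ind.toList ++ ['.', 'p', 'y'] := by
          rw [beq_iff_eq]
          constructor
          · intro h; rw [h, String.toList_append]; rfl
          · intro h
            have e : (ind ++ ".py").toList = ind.toList ++ ['.', 'p', 'y'] := by
              simp [String.toList_append]
            rw [← String.ofList_toList (s := PySem.Str.lower fp), h, ← e, String.ofList_toList]
        simp only [Bool.or_eq_true, c1, c2, c3, c4, c5]
        rcases pvDecomp (PySem.Str.lower fp).toList with hns | ⟨l, r, hplr, hr⟩
        · -- no slash in the whole path: only the `P == ind ++ ".py"` branch can fire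
          have hnl : (pvSplitSlash (PySem.Str.lower fp).toList).getLastD []
              = (PySem.Str.lower fp).toList := by
            rw [pvLastNoSlash _ hns]; rfl
          rw [hnl]
          constructor
          · rintro (((h | h) | h) | h | h)
            · exact absurd (h.subset (by simp)) hns
            · exact absurd (h.subset (by simp)) hns
            · exact absurd (h.subset (by simp)) hns
            · exact absurd (h.subset (by simp)) hns
            · exact h
          · intro h; exact Or.inr (Or.inr h)
        · -- the path has a last slash: P = l ++ '/' :: r
          have hnl : (pvSplitSlash (PySem.Str.lower fp).toList).getLastD [] = r := by
            rw [hplr]; exact pvLastSeg r hr l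
          rw [hnl, hplr]
          constructor
          · rintro (((h | h) | h) | h | h)
            · exact absurd (pvSeg1 _ _ hg (hplr ▸ h)) (fun hm => pvTokHit _ htok ind hin hm)
            · exact absurd (pvSeg2 _ _ hg (hplr ▸ h)) (fun hm => pvTokHit _ htok ind hin hm)
            · exact absurd (pvSeg3 _ _ hg (hplr ▸ h)) (fun hm => pvTokHit _ htok ind hin hm)
            · exact (pvUniqSuffix l r _ hr hw' h).symm
            · exact absurd (h ▸ List.mem_append_right l (List.mem_cons_self ..)) hw'
          · intro h
            rw [h]
            exact Or.inr (Or.inl (List.suffix_append l _))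
      constructor
      · rintro ⟨i, hi, hf⟩; exact ⟨i, hi, (key i hi).mp hf⟩
      · rintro ⟨i, hi, hf⟩; exact ⟨i, hi, (key i hi).mpr hf⟩
    cases hl : (pvArchIndicators.any (fun indicator =>
        (PySem.Str.isIn ("/" ++ indicator ++ "/") (PySem.Str.lower fp) ||
         PySem.Str.startswith (PySem.Str.lower fp) (indicator ++ "/") ||
         PySem.Str.endswith (PySem.Str.lower fp) ("/" ++ indicator)) ||
        (PySem.Str.endswith (PySem.Str.lower fp) ("/" ++ indicator ++ ".py") ||
         PySem.Str.lower fp == indicator ++ ".py"))) with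
    | true => simp only [if_true]; exact (hiff.mp hl).symm
    | false =>
      simp only [Bool.false_eq_true, if_false]
      symm
      rw [← Bool.not_eq_true]
      intro h
      rw [hiff.mpr h] at hl
      exact Bool.true_eq_false.mp hl

-- ===== VERDICT (by name: the statement is the Claim_ definition above) =====
theorem is_architectural_file_py_spec : Claim_equal_is_architectural_file_py := by
  intro fp _
  unfold Spec_is_architectural_file_py
  exact pvMain fp
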